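-- pv_equiv track=rewrite | github.com/Aruuni/mininettestbed | james/graph_testing.py | grid_pos
-- ===== SOURCE A (Python) =====
-- import math
--
-- def grid_pos(num_nodes):
--     side = int(math.sqrt(num_nodes))
--     pos = {}
--     for i in range(num_nodes):
--         row = i // side
--         col = i % side
--         pos[i] = (col, -row)  # negative row so it plots top to bottom
--     return pos
-- ===== SOURCE B (Python) =====
-- import math
--
-- def grid_pos(num_nodes):
--     side = math.isqrt(num_nodes)
--     pos = {}
--     i = 0
--     row = 0
--     while i < num_nodes:
--         for col in range(side):
--             pos[i] = (col, -row)
--             i += 1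
--             if i == num_nodes:
--                 break
--         row += 1
--     return pos
-- ===== Notes on version B (the rewrite author's own statement) =====
-- stated objective: alternative
-- what changed: Replaces the flat loop that derives row/col from each index by // and % with an explicit nested row-by-row/column-by-column walk (running index, inner break), building the same dict in the same order with no division at all.
import Mathlib
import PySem

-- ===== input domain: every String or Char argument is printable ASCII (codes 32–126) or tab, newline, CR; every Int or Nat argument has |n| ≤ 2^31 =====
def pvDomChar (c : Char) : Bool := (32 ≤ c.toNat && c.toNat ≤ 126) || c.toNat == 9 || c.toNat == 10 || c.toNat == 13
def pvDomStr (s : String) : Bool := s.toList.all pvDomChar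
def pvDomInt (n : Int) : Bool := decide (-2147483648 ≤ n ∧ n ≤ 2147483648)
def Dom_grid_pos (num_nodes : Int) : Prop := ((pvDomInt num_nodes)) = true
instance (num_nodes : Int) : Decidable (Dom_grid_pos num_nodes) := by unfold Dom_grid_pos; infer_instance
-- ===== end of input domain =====

-- B keeps the same output but walks the grid row by row with a running index and an inner
-- break, instead of deriving row/col from each index by // and % (objective: alternative).

-- ===== PORT A =====
-- int(math.sqrt(n)) for 0 ≤ n ≤ 2^31 equals the integer square root (float sqrt is exact
-- enough on this range), ported as Nat.sqrt on n.toNat.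
def grid_pos (num_nodes : Int) : List (Int × Int × Int) :=
  let side : Int := (Nat.sqrt num_nodes.toNat : Int)
  let pos : PySem.Dict Int (Int × Int) :=
    (PySem.List.pyRange 0 num_nodes 1).foldl (fun pos i =>
      let row := PySem.Int.floordiv i side
      let col := PySem.Int.mod i side
      pos.insert i (col, -row)) PySem.Dict.empty
  pos.items

-- ===== PORT B =====
-- the inner 'for col in range(side): … if i == num_nodes: break'
def gridInnerB (num_nodes : Int) :
    List Int → PySem.Dict Int (Int × Int) → Int → Int → PySem.Dict Int (Int × Int) × Int
  | [], pos, i, _row => (pos, i)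
  | col :: rest, pos, i, row =>
      let pos := pos.insert i (col, -row)
      let i := i + 1
      if i = num_nodes then (pos, i) else gridInnerB num_nodes rest pos i row

-- the outer 'while i < num_nodes' loop; fuel = num_nodes.toNat outer rounds always suffice
-- because each round with i < num_nodes inserts at least one node (side ≥ 1 there)
def gridOuterB (num_nodes side : Int) :
    Nat → PySem.Dict Int (Int × Int) → Int → Int → PySem.Dict Int (Int × Int)
  | 0, pos, _, _ => pos
  | fuel + 1, pos, i, row =>
      if i < num_nodes then
        let r := gridInnerB num_nodes (PySem.List.pyRange 0 side 1) pos i row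
        gridOuterB num_nodes side fuel r.1 r.2 (row + 1)
      else pos

-- math.isqrt(n) = Nat.sqrt n for 0 ≤ n
def grid_pos_alt (num_nodes : Int) : List (Int × Int × Int) :=
  let side : Int := (Nat.sqrt num_nodes.toNat : Int)
  (gridOuterB num_nodes side num_nodes.toNat PySem.Dict.empty 0 0).items

-- ===== PRECONDITION & SPEC =====
-- A raises ValueError (math.sqrt of a negative number) when num_nodes < 0; excluded.
def Pre_grid_pos (num_nodes : Int) : Prop := 0 ≤ num_nodes
instance (num_nodes : Int) : Decidable (Pre_grid_pos num_nodes) := by unfold Pre_grid_pos; infer_instance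
def pvWitness_grid_pos : Int := (5)

def Spec_grid_pos (num_nodes : Int) (out : List (Int × Int × Int)) : Prop := out = grid_pos_alt num_nodes
instance (num_nodes : Int) (out : List (Int × Int × Int)) : Decidable (Spec_grid_pos num_nodes out) := by unfold Spec_grid_pos; infer_instance

-- ===== CLAIM (what is proved, stated in full; the proofs are below) =====
def Claim_equal_grid_pos : Prop := ∀ (num_nodes : Int), Dom_grid_pos num_nodes → Pre_grid_pos num_nodes → Spec_grid_pos num_nodes (grid_pos num_nodes)

-- ===== LEMMAS AND PROOFS =====

-- the insertion step both programs perform for node j on a grid of width s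
def gridF (s : Int) (d : PySem.Dict Int (Int × Int)) (j : Int) : PySem.Dict Int (Int × Int) :=
  d.insert j (PySem.Int.mod j s, -(PySem.Int.floordiv j s))

theorem gridF_eq (s row c : Int) (hc0 : 0 ≤ c) (hcs : c < s)
    (d : PySem.Dict Int (Int × Int)) :
    gridF s d (row * s + c) = d.insert (row * s + c) (c, -row) := by
  have hs : 0 < s := lt_of_le_of_lt hc0 hcs
  have hmod : PySem.Int.mod (row * s + c) s = c := by
    rw [PySem.Int.mod_eq_emod_of_pos hs]
    rw [add_comm, mul_comm row s, Int.add_mul_emod_self_left]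
    exact Int.emod_eq_of_lt hc0 hcs
  have hdiv : PySem.Int.floordiv (row * s + c) s = row := by
    rw [PySem.Int.floordiv_eq_ediv_of_pos hs]
    rw [add_comm, Int.add_mul_ediv_right _ _ (ne_of_gt hs)]
    rw [Int.ediv_eq_zero_of_lt hc0 hcs]
    omega
  simp [gridF, hmod, hdiv]

theorem inner_eq (N s : Int) :
    ∀ (k : Nat) (c : Int), (s - c).toNat = k → 0 ≤ c → c ≤ s →
    ∀ (pos : PySem.Dict Int (Int × Int)) (row b : Int), b = row * s → b + c < N →
      gridInnerB N (PySem.List.pyRange c s 1) pos (b + c) row =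
        ((PySem.List.pyRange (b + c) (min N (b + s)) 1).foldl (gridF s) pos, min N (b + s)) := by
  intro k
  induction k with
  | zero =>
      intro c hk hc0 hcs pos row b hb hlt
      have hcs' : c = s := by omega
      rw [PySem.List.pyRange_one_eq_nil (by omega)]
      have hmin : min N (b + s) = b + s := by omega
      rw [hmin, ← hcs', PySem.List.pyRange_one_eq_nil (by omega)]
      rfl
  | succ k ih =>
      intro c hk hc0 hcs pos row b hb hlt
      have hclt : c < s := by omega
      rw [PySem.List.pyRange_one_cons hclt]
      simp only [gridInnerB]
      by_cases hbrk : b + c + 1 = N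
      · rw [if_pos hbrk]
        have hmin : min N (b + s) = N := by omega
        rw [hmin, ← hbrk]
        rw [show b + c + 1 = (b + c) + 1 from rfl, PySem.List.pyRange_one_singleton]
        simp only [List.foldl_cons, List.foldl_nil]
        rw [hb, gridF_eq s row c hc0 hclt]
      · rw [if_neg hbrk]
        have h1 : b + c + 1 = b + (c + 1) := by ring
        rw [h1]
        rw [ih (c + 1) (by omega) (by omega) (by omega) (pos.insert (b + c) (c, -row)) row b hb (by omega)]
        have hsplit : PySem.List.pyRange (b + c) (min N (b + s)) 1 =
            PySem.List.pyRange (b + c) (b + (c + 1)) 1 ++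
            PySem.List.pyRange (b + (c + 1)) (min N (b + s)) 1 :=
          PySem.List.pyRange_one_append _ _ _ (by omega) (by omega)
        rw [hsplit, List.foldl_append]
        rw [show b + (c + 1) = (b + c) + 1 by ring, PySem.List.pyRange_one_singleton]
        simp only [List.foldl_cons, List.foldl_nil]
        rw [hb, gridF_eq s row c hc0 hclt]

theorem outer_eq (N s : Int) (hs : 0 < s) :
    ∀ (fuel : Nat) (pos : PySem.Dict Int (Int × Int)) (row b : Int),
      b = row * s → N ≤ b + (fuel : Int) * s →
      gridOuterB N s fuel pos b row =
        (PySem.List.pyRange b N 1).foldl (gridF s) pos := by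
  intro fuel
  induction fuel with
  | zero =>
      intro pos row b hb hfuel
      simp only [Int.natCast_zero, zero_mul, add_zero] at hfuel
      rw [PySem.List.pyRange_one_eq_nil hfuel]
      rfl
  | succ fuel ih =>
      intro pos row b hb hfuel
      show (if b < N then _ else pos) = _
      by_cases hlt : b < N
      · rw [if_pos hlt]
        have hin := inner_eq N s (s - 0).toNat 0 rfl le_rfl (le_of_lt hs) pos row b hb (by omega)
        simp only [add_zero] at hin
        rw [hin]
        have hcast : ((fuel + 1 : Nat) : Int) * s = (fuel : Int) * s + s := by push_cast; ring
        rw [hcast] at hfuel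
        by_cases hfull : b + s ≤ N
        · have hmin : min N (b + s) = b + s := by omega
          rw [hmin]
          rw [ih _ (row + 1) (b + s) (by rw [hb]; ring) (by omega)]
          rw [← List.foldl_append, ← PySem.List.pyRange_one_append _ _ _ (by omega) (by omega)]
        · have hmin : min N (b + s) = N := by omega
          rw [hmin]
          have hstop : ∀ p, gridOuterB N s fuel p N (row + 1) = p := by
            intro p
            cases fuel with
            | zero => rfl
            | succ m =>
                show (if N < N then _ else p) = p
                rw [if_neg (lt_irrefl N)]
          rw [hstop]
      · rw [if_neg hlt]
        rw [PySem.List.pyRange_one_eq_nil (by omega)]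
        rfl

-- ===== VERDICT (by name: the statement is the Claim_ definition above) =====
theorem grid_pos_spec : Claim_equal_grid_pos := by
  intro N _hdom hpre
  unfold Spec_grid_pos grid_pos grid_pos_alt
  by_cases hN : N = 0
  · subst hN; rfl
  · have hNpos : 0 < N := lt_of_le_of_ne hpre (Ne.symm hN)
    set s : Int := (Nat.sqrt N.toNat : Int) with hsdef
    have hs : 0 < s := by
      rw [hsdef]
      exact_mod_cast Nat.sqrt_pos.mpr (by omega)
    have hfuel : N ≤ (0 : Int) + (N.toNat : Int) * s := by
      have h1 : (N.toNat : Int) = N := by omega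
      nlinarith
    have h := outer_eq N s hs N.toNat PySem.Dict.empty 0 0 (by ring) hfuel
    exact congrArg PySem.Dict.items h.symm
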